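-- pv_equiv track=rewrite | github.com/RuellePaul/facebook-coding-puzzles | Level 1 - Stack Stabilization (Chapter 1)/solution.py | getMinimumDeflatedDiscCount
-- ===== SOURCE A (Python) =====
-- from typing import List
--
-- def getMinimumDeflatedDiscCount(N: int, R: List[int]) -> int:
--     result = 0
--
--     R = list(reversed(R))
--
--     for disc_index, radius in enumerate(R):
--         if radius < N - disc_index:
--             result = -1
--             break
--         if disc_index < N - 1:
--             bottom_radius = R[disc_index + 1]
--             if bottom_radius >= radius:
--                 R[disc_index + 1] = radius - 1
--                 result += 1
--
--     return result
-- ===== SOURCE B (Python) =====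
-- from typing import List
--
-- def getMinimumDeflatedDiscCount(N: int, R: List[int]) -> int:
--     n = len(R)
--     # Infeasible iff some disc (with d discs above it in the stack, i.e. at
--     # reversed position d) has radius < N - d already before any deflation.
--     if any(R[i] < N - (n - 1 - i) for i in range(n)):
--         return -1
--     if n == 0:
--         return 0
--     # Count deflations via a prefix minimum of (radius at reversed position d) + d:
--     # the effective radius at position d is m - d, and position d is deflated
--     # exactly when its own radius is at least the effective radius above it.
--     m = R[-1]
--     count = 0
--     for d in range(1, min(n, max(N, 0))):
--         r = R[n - 1 - d]
--         if r + d > m: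
--             count += 1
--         m = min(m, r + d)
--     return count
-- ===== Notes on version B (the rewrite author's own statement) =====
-- stated objective: alternative
-- what changed: Replaces the reversed-copy-and-mutate single pass (which writes deflated radii back into the list and breaks on the deflated value) by a two-phase computation: an upfront feasibility test on the raw radii, then a prefix-minimum scan of radius+position that counts deflations without any list copy or mutation.
import Mathlib
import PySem

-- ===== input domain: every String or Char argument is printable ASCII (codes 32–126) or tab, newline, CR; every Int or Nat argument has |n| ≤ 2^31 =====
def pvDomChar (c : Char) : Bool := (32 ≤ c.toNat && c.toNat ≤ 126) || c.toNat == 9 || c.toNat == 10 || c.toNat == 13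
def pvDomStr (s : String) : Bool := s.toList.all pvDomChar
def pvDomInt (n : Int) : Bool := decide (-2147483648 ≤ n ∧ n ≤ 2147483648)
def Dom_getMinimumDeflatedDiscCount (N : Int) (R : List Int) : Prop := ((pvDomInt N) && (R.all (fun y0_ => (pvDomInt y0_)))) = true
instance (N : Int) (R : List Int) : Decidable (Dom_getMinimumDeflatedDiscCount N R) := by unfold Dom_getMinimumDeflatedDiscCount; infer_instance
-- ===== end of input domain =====

-- B replaces A's reversed-copy-and-mutate pass by an upfront feasibility test on the raw
-- radii plus a prefix-minimum scan counting deflations (no list copy, no list mutation);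
-- A mutates only its own local copy of R, so no caller-visible side effect is at stake.

-- ===== PORT A =====
-- A's for-loop over enumerate of the live (mutated) reversed list, with `break`:
-- fuel = remaining iterations, d = disc_index, R is the mutated local list state.


def pvALoop (N : Int) (fuel : Nat) (d : Nat) (R : List Int) (result : Int) : Int :=
  match fuel with
  | 0 => result
  | f + 1 =>
    let radius := (PySem.List.pyGet? R (d : Int)).getD 0
    if radius < N - (d : Int) then -1
    else if (d : Int) < N - 1 then
      let bottom := (PySem.List.pyGet? R ((d + 1 : Nat) : Int)).getD 0
      if bottom ≥ radius then pvALoop N f (d + 1) (R.set (d + 1) (radius - 1)) (result + 1)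
      else pvALoop N f (d + 1) R result
    else pvALoop N f (d + 1) R result

def getMinimumDeflatedDiscCount (N : Int) (R : List Int) : Int :=
  pvALoop N R.reverse.length 0 R.reverse 0

-- ===== PORT B =====

def getMinimumDeflatedDiscCount_alt (N : Int) (R : List Int) : Int :=
  let n : Int := R.length
  if (PySem.List.pyRange 0 n 1).any
      (fun i => decide ((PySem.List.pyGet? R i).getD 0 < N - (n - 1 - i))) then -1
  else if R.length = 0 then 0
  else
    let p := (PySem.List.pyRange 1 (min n (max N 0)) 1).foldl
      (fun (mc : Int × Int) d =>
        let r := (PySem.List.pyGet? R ((R.length : Int) - 1 - d)).getD 0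
        (min mc.1 (r + d), if r + d > mc.1 then mc.2 + 1 else mc.2))
      ((PySem.List.pyGet? R (-1)).getD 0, 0)
    p.2

-- ===== PRECONDITION & SPEC =====
-- Pre_ excludes exactly the inputs on which A raises IndexError (reading R[disc_index+1]
-- past the end, which happens iff 1 ≤ len(R) < N and no early infeasibility return fires).

def Pre_getMinimumDeflatedDiscCount (N : Int) (R : List Int) : Prop :=
  R = [] ∨ N ≤ (R.length : Int) ∨
    ∃ i < R.length, R.getD i 0 < N - ((R.length : Int) - 1 - (i : Int))

instance (N : Int) (R : List Int) : Decidable (Pre_getMinimumDeflatedDiscCount N R) := by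
  unfold Pre_getMinimumDeflatedDiscCount; infer_instance
def pvWitness_getMinimumDeflatedDiscCount : Int × List Int := (3, [1, 2, 3])

def Spec_getMinimumDeflatedDiscCount (N : Int) (R : List Int) (out : Int) : Prop :=
  out = getMinimumDeflatedDiscCount_alt N R
instance (N : Int) (R : List Int) (out : Int) : Decidable (Spec_getMinimumDeflatedDiscCount N R out) := by
  unfold Spec_getMinimumDeflatedDiscCount; infer_instance

-- ===== CLAIM (what is proved, stated in full; the proofs are below) =====
def Claim_equal_getMinimumDeflatedDiscCount : Prop :=
  ∀ (N : Int) (R : List Int), Dom_getMinimumDeflatedDiscCount N R →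
    Pre_getMinimumDeflatedDiscCount N R →
    Spec_getMinimumDeflatedDiscCount N R (getMinimumDeflatedDiscCount N R)

-- ===== LEMMAS AND PROOFS =====

-- Reference form of A's loop over the not-yet-visited suffix `rest` of the reversed list,
-- carrying the effective (possibly deflated) radius `e` of the current disc d.

def pvRef (N : Int) (d : Nat) (e : Int) (rest : List Int) (res : Int) : Int :=
  if e < N - (d : Int) then -1
  else match rest with
  | [] => if (d : Int) < N - 1 ∧ 0 ≥ e then res + 1 else res
  | r :: rest' =>
      if (d : Int) < N - 1 ∧ r ≥ e then pvRef N (d + 1) (e - 1) rest' (res + 1)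
      else pvRef N (d + 1) r rest' res

-- Deflation count of the suffix `rest` below disc d of effective radius e.

def pvCnt (N : Int) (d : Nat) (e : Int) (rest : List Int) : Int :=
  match rest with
  | [] => 0
  | r :: rest' =>
      if (d : Int) < N - 1 ∧ r ≥ e then 1 + pvCnt N (d + 1) (e - 1) rest'
      else pvCnt N (d + 1) r rest'

theorem pvALoop_eq_pvRef (N : Int) : ∀ (rest P : List Int) (d : Nat) (e res : Int),
    P.length = d → pvALoop N (rest.length + 1) d (P ++ e :: rest) res = pvRef N d e rest res := by
  intro rest
  induction rest with
  | nil =>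
    intro P d e res hP
    subst hP
    show pvALoop N 1 P.length (P ++ e :: []) res = _
    rw [pvALoop, pvRef]
    rw [PySem.List.pyGet?_append_length]
    have hb : PySem.List.pyGet? (P ++ e :: []) ((P.length + 1 : Nat) : Int) = none := by
      rw [PySem.List.pyGet?_eq_none_iff]
      simp [PySem.Raise.InRange]
    simp only [hb, Option.getD_some, Option.getD_none]
    by_cases h1 : e < N - (P.length : Int)
    · simp [h1]
    · by_cases h2 : (P.length : Int) < N - 1
      · by_cases h3 : (0 : Int) ≥ e
        · simp [h1, h2, h3, pvALoop]
        · simp [h1, h2, h3, pvALoop]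
      · simp [h1, h2, pvALoop]
  | cons r rest' ih =>
    intro P d e res hP
    subst hP
    show pvALoop N (rest'.length + 1 + 1) P.length (P ++ e :: r :: rest') res = _
    rw [pvALoop, pvRef]
    rw [PySem.List.pyGet?_append_length]
    have hre : P ++ e :: r :: rest' = (P ++ [e]) ++ r :: rest' := by simp
    have hlen : ((P ++ [e]).length : Int) = ((P.length + 1 : Nat) : Int) := by simp
    have hb : PySem.List.pyGet? (P ++ e :: r :: rest') ((P.length + 1 : Nat) : Int) = some r := by
      rw [hre, ← hlen, PySem.List.pyGet?_append_length]
    have hset : (P ++ e :: r :: rest').set (P.length + 1) (e - 1) = (P ++ [e]) ++ (e - 1) :: rest' := by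
      rw [hre]
      have : (P ++ [e]).length = P.length + 1 := by simp
      rw [← this]
      simp
    simp only [hb, Option.getD_some]
    by_cases h1 : e < N - (P.length : Int)
    · simp [h1]
    · by_cases h2 : (P.length : Int) < N - 1
      · by_cases h3 : r ≥ e
        · rw [if_neg h1, if_neg h1, if_pos h2, if_pos h3,
            if_pos (show ((P.length : Int) < N - 1 ∧ r ≥ e) from ⟨h2, h3⟩), hset]
          have := ih (P ++ [e]) (P.length + 1) (e - 1) (res + 1) (by simp)
          simpa using this
        · rw [if_neg h1, if_neg h1, if_pos h2, if_neg h3,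
            if_neg (show ¬((P.length : Int) < N - 1 ∧ r ≥ e) from fun h => h3 h.2), hre]
          have := ih (P ++ [e]) (P.length + 1) r res (by simp)
          simpa using this
      · rw [if_neg h1, if_neg h1, if_neg h2,
          if_neg (show ¬((P.length : Int) < N - 1 ∧ r ≥ e) from fun h => h2 h.1), hre]
        have := ih (P ++ [e]) (P.length + 1) r res (by simp)
        simpa using this

theorem pvRef_bad (N : Int) : ∀ (rest : List Int) (d : Nat) (e res : Int),
    (e < N - (d : Int) ∨ ∃ j < rest.length, rest.getD j 0 < N - ((d : Int) + 1 + (j : Int))) →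
    pvRef N d e rest res = -1 := by
  intro rest
  induction rest with
  | nil =>
    intro d e res h
    rcases h with h | ⟨j, hj, _⟩
    · rw [pvRef, if_pos h]
    · simp at hj
  | cons r rest' ih =>
    intro d e res h
    by_cases h1 : e < N - (d : Int)
    · rw [pvRef, if_pos h1]
    · rcases h with h | ⟨j, hj, hv⟩
      · exact absurd h h1
      · rw [pvRef, if_neg h1]
        rcases Nat.eq_zero_or_pos j with rfl | hjpos
        · -- r < N - (d+1); both branches recurse with carry < N - (d+1)
          simp only [List.getD_cons_zero, Nat.cast_zero, add_zero] at hv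
          split
          · rename_i hc
            exact ih (d + 1) (e - 1) (res + 1) (Or.inl (by push_cast; omega))
          · exact ih (d + 1) r res (Or.inl (by push_cast; omega))
        · have hj' : j - 1 < rest'.length := by simp at hj; omega
          have hv' : rest'.getD (j-1) 0 < N - ((d + 1 : Nat) : Int) - 1 - ((j - 1 : Nat) : Int) + 0 := by
            have : (r :: rest').getD j 0 = rest'.getD (j-1) 0 := by
              rcases j with _ | j0
              · omega
              · simp
            rw [this] at hv
            push_cast [Nat.cast_sub (by omega : 1 ≤ j)]
            push_cast at hv
            omega
          split
          · exact ih (d + 1) (e - 1) (res + 1) (Or.inr ⟨j - 1, hj', by push_cast at hv' ⊢; omega⟩)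
          · exact ih (d + 1) r res (Or.inr ⟨j - 1, hj', by push_cast at hv' ⊢; omega⟩)

theorem pvCnt_zero (N : Int) : ∀ (rest : List Int) (d : Nat) (e : Int),
    N - 1 ≤ (d : Int) → pvCnt N d e rest = 0 := by
  intro rest
  induction rest with
  | nil => intro d e _; rfl
  | cons r rest' ih =>
    intro d e hd
    rw [pvCnt, if_neg (fun h => absurd h.1 (by omega))]
    exact ih (d + 1) r (by push_cast; omega)

theorem pvRef_good (N : Int) : ∀ (rest : List Int) (d : Nat) (e res : Int),
    N ≤ (d : Int) + 1 + rest.length →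
    N - (d : Int) ≤ e →
    (∀ j < rest.length, N - ((d : Int) + 1 + (j : Int)) ≤ rest.getD j 0) →
    pvRef N d e rest res = res + pvCnt N d e rest := by
  intro rest
  induction rest with
  | nil =>
    intro d e res hN he _
    rw [pvRef, if_neg (by omega), pvCnt]
    rw [if_neg (by simp at hN; intro h; omega)]
    omega
  | cons r rest' ih =>
    intro d e res hN he hall
    rw [pvRef, if_neg (by omega), pvCnt]
    have h0 : N - ((d : Int) + 1 + 0) ≤ r := hall 0 (by simp)
    have hall' : ∀ j < rest'.length, N - (((d + 1 : Nat) : Int) + 1 + (j : Int)) ≤ rest'.getD j 0 := by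
      intro j hj
      have := hall (j + 1) (by simp; omega)
      simp only [List.getD_cons_succ] at this
      push_cast at this ⊢
      omega
    have hN' : N ≤ ((d + 1 : Nat) : Int) + 1 + rest'.length := by
      simp at hN ⊢; push_cast at hN ⊢; omega
    split
    · rename_i hc
      rw [ih (d + 1) (e - 1) (res + 1) hN' (by push_cast; omega) hall']
      ring
    · rename_i hc
      rw [ih (d + 1) r res hN' (by push_cast at h0 ⊢; omega) hall']

theorem pvFoldCnt (N : Int) (R : List Int) : ∀ (k d : Nat), R.length - (d + 1) = k → d < R.length →
    ∀ (e res : Int),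
    ((PySem.List.pyRange ((d : Int) + 1) (min (R.length : Int) (max N 0)) 1).foldl
       (fun (mc : Int × Int) j =>
          let r := (PySem.List.pyGet? R ((R.length : Int) - 1 - j)).getD 0
          (min mc.1 (r + j), if r + j > mc.1 then mc.2 + 1 else mc.2))
       (e + (d : Int), res)).2 = res + pvCnt N d e (R.reverse.drop (d + 1)) := by
  intro k
  induction k with
  | zero =>
    intro d hk hd e res
    have hlen : R.length = d + 1 := by omega
    rw [PySem.List.pyRange_one_eq_nil (by omega)]
    rw [List.drop_eq_nil_of_le (by simp [hlen])]
    simp [pvCnt]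
  | succ k ih =>
    intro d hk hd e res
    have hd1 : d + 1 < R.length := by omega
    by_cases hM : (d : Int) + 1 < min (R.length : Int) (max N 0)
    · rw [PySem.List.pyRange_one_cons hM, List.foldl_cons]
      have hidx : (R.length : Int) - 1 - ((d : Int) + 1) = ((R.length - d - 2 : Nat) : Int) := by
        omega
      have hget : (PySem.List.pyGet? R ((R.length : Int) - 1 - ((d : Int) + 1))).getD 0
          = R.reverse[d + 1]'(by simpa using hd1) := by
        rw [hidx, PySem.List.pyGet?_natCast]
        rw [List.getElem?_eq_getElem (by omega)]
        simp only [Option.getD_some]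
        rw [List.getElem_reverse]
        congr 1
        omega
      have hdrop : R.reverse.drop (d + 1)
          = R.reverse[d + 1]'(by simpa using hd1) :: R.reverse.drop (d + 1 + 1) := by
        rw [List.drop_eq_getElem_cons (by simpa using hd1)]
      set r := R.reverse[d + 1]'(by simpa using hd1) with hr
      have hNpos : (d : Int) + 1 < N := by
        have := lt_min_iff.mp hM
        omega
      have hguard : ((d : Int) < N - 1) := by omega
      rw [hdrop, pvCnt]
      by_cases hc : r ≥ e
      · rw [if_pos ⟨hguard, hc⟩]
        simp only [hget]
        rw [if_pos (by omega : r + ((d : Int) + 1) > e + (d : Int))]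
        rw [min_eq_left (by omega : e + (d : Int) ≤ r + ((d : Int) + 1))]
        have h2 : e + (d : Int) = (e - 1) + ((d : Int) + 1) := by ring
        rw [h2]
        have hih := ih (d + 1) (by omega) hd1 (e - 1) (res + 1)
        push_cast at hih
        rw [hih]
        ring
      · rw [if_neg (fun h => hc h.2)]
        simp only [hget]
        rw [if_neg (by omega : ¬ (r + ((d : Int) + 1) > e + (d : Int)))]
        rw [min_eq_right (by omega : r + ((d : Int) + 1) ≤ e + (d : Int))]
        have hih := ih (d + 1) (by omega) hd1 r res
        push_cast at hih
        rw [hih]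
    · rw [PySem.List.pyRange_one_eq_nil (by omega)]
      have : (d : Int) + 1 ≥ max N 0 := by
        have : ((d : Int) + 1) < (R.length : Int) := by push_cast; omega
        omega
      rw [pvCnt_zero N _ d e (by omega)]
      simp

theorem pvAnyIffPre (N : Int) (R : List Int) :
    ((PySem.List.pyRange 0 (R.length : Int) 1).any
        (fun i => decide ((PySem.List.pyGet? R i).getD 0 < N - ((R.length : Int) - 1 - i))) = true)
    ↔ (∃ i < R.length, R.getD i 0 < N - ((R.length : Int) - 1 - (i : Int))) := by
  rw [List.any_eq_true]
  constructor
  · rintro ⟨x, hx, hfx⟩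
    rw [PySem.List.mem_pyRange_one] at hx
    obtain ⟨hx0, hxn⟩ := hx
    simp only [decide_eq_true_eq] at hfx
    have hxnat : x = ((x.toNat : Nat) : Int) := by omega
    rw [hxnat, PySem.List.pyGet?_natCast] at hfx
    refine ⟨x.toNat, by omega, ?_⟩
    rw [List.getD_eq_getElem?_getD]
    rw [← hxnat] at hfx
    convert hfx using 2
    omega
  · rintro ⟨i, hi, h⟩
    refine ⟨(i : Int), ?_, ?_⟩
    · rw [PySem.List.mem_pyRange_one]; omega
    · simp only [decide_eq_true_eq, PySem.List.pyGet?_natCast]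
      rw [List.getD_eq_getElem?_getD] at h
      exact h

theorem pvGetD_eq (l : List Int) (i : Nat) (h : i < l.length) : l.getD i 0 = l[i] := by
  rw [List.getD_eq_getElem?_getD, List.getElem?_eq_getElem h, Option.getD_some]

theorem pvReindex (N : Int) (R : List Int) :
    (∃ i < R.length, R.getD i 0 < N - ((R.length : Int) - 1 - (i : Int)))
    ↔ (∃ j < R.reverse.length, R.reverse.getD j 0 < N - (j : Int)) := by
  constructor
  · rintro ⟨i, hi, h⟩
    refine ⟨R.length - 1 - i, by simp; omega, ?_⟩
    rw [pvGetD_eq _ _ (by simp; omega), List.getElem_reverse]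
    rw [pvGetD_eq _ _ hi] at h
    have heq : R.length - 1 - (R.length - 1 - i) = i := by omega
    simp only [heq]
    have : ((R.length - 1 - i : Nat) : Int) = (R.length : Int) - 1 - (i : Int) := by omega
    omega
  · rintro ⟨j, hj, h⟩
    simp only [List.length_reverse] at hj
    refine ⟨R.length - 1 - j, by omega, ?_⟩
    rw [pvGetD_eq _ _ (by omega)]
    rw [pvGetD_eq _ _ (by simp; omega), List.getElem_reverse] at h
    have h2 : ((R.length - 1 - j : Nat) : Int) = (R.length : Int) - 1 - (j : Int) := by omega
    rw [h2]
    have h3 : (R.length : Int) - 1 - ((R.length : Int) - 1 - (j : Int)) = (j : Int) := by ring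
    rw [h3]
    exact h

theorem pvMain (N : Int) (R : List Int) (hpre : Pre_getMinimumDeflatedDiscCount N R) :
    getMinimumDeflatedDiscCount N R = getMinimumDeflatedDiscCount_alt N R := by
  by_cases hemp : R = []
  · subst hemp
    rfl
  · have hrev : R.reverse ≠ [] := fun h => hemp (by simpa using congrArg List.reverse h)
    obtain ⟨e, t, hV⟩ := List.exists_cons_of_ne_nil hrev
    have hA : getMinimumDeflatedDiscCount N R = pvRef N 0 e t 0 := by
      unfold getMinimumDeflatedDiscCount
      rw [hV]
      have := pvALoop_eq_pvRef N t [] 0 e 0 rfl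
      simpa using this
    have hlen : R.length = t.length + 1 := by
      have := congrArg List.length hV
      simpa using this
    by_cases hany : ((PySem.List.pyRange 0 (R.length : Int) 1).any
        (fun i => decide ((PySem.List.pyGet? R i).getD 0
          < N - ((R.length : Int) - 1 - i))) = true)
    · -- infeasible: both return -1
      have hB : getMinimumDeflatedDiscCount_alt N R = -1 := by
        unfold getMinimumDeflatedDiscCount_alt
        simp only [if_pos hany]
      rw [hB, hA]
      obtain ⟨j, hj, hjv⟩ := (pvReindex N R).mp ((pvAnyIffPre N R).mp hany)
      rw [hV] at hj hjv
      apply pvRef_bad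
      rcases j with _ | j'
      · left
        simpa using hjv
      · right
        refine ⟨j', by simpa using hj, ?_⟩
        simp only [List.getD_cons_succ] at hjv
        push_cast at hjv ⊢
        omega
    · -- feasible: A = pvCnt, B = pvCnt
      have hnpre : ¬ ∃ i < R.length, R.getD i 0 < N - ((R.length : Int) - 1 - (i : Int)) :=
        fun h => hany ((pvAnyIffPre N R).mpr h)
      have hN : N ≤ (R.length : Int) := by
        rcases hpre with h | h | h
        · exact absurd h hemp
        · exact h
        · exact absurd h hnpre
      have hok : ∀ j < R.reverse.length, N - (j : Int) ≤ R.reverse.getD j 0 := by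
        intro j hj
        by_contra hlt
        exact hany ((pvAnyIffPre N R).mpr ((pvReindex N R).mpr ⟨j, hj, by omega⟩))
      have he : N ≤ e := by
        have := hok 0 (by rw [hV]; simp)
        rw [hV] at this
        simpa using this
      have hall : ∀ j < t.length, N - ((0 : Nat) + 1 + (j : Int)) ≤ t.getD j 0 := by
        intro j hj
        have := hok (j + 1) (by rw [hV]; simpa using Nat.succ_lt_succ hj)
        rw [hV] at this
        simp only [List.getD_cons_succ] at this
        push_cast at this ⊢
        omega
      have hgood := pvRef_good N t 0 e 0 (by push_cast; omega) (by push_cast; omega) hall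
      have hlast : (PySem.List.pyGet? R (-1)).getD 0 = e := by
        rw [PySem.List.pyGet?_neg_one]
        rw [List.getLast?_eq_head?_reverse, hV]
        rfl
      have hF := pvFoldCnt N R (R.length - 1) 0 (by omega) (by omega) e 0
      simp only [Nat.cast_zero, add_zero, zero_add] at hF hgood
      rw [hV, List.drop_one, List.tail_cons] at hF
      have hB : getMinimumDeflatedDiscCount_alt N R = pvCnt N 0 e t := by
        unfold getMinimumDeflatedDiscCount_alt
        rw [if_neg hany]
        rw [if_neg (by omega : ¬ R.length = 0)]
        simp only [hlast]
        exact hF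
      rw [hA, hB, hgood]

-- ===== VERDICT (by name: the statement is the Claim_ definition above) =====
theorem getMinimumDeflatedDiscCount_spec : Claim_equal_getMinimumDeflatedDiscCount := by
  intro N R _ hpre
  unfold Spec_getMinimumDeflatedDiscCount
  exact pvMain N R hpre
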